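-- pv_equiv track=rewrite | github.com/rohitvxrma77/BMS-Automation | bms_notifier_gui.py | text_contains_any
-- ===== SOURCE A (Python) =====
-- from typing import List, Optional
--
-- def text_contains_any(text: str, needles: List[str]) -> List[str]:
--     t = text.lower()
--     hits = []
--     for s in needles:
--         s = (s or "").strip()
--         if s and s.lower() in t:
--             hits.append(s)
--     return hits
-- ===== SOURCE B (Python) =====
-- def text_contains_any(text, needles):
--     # One pass over text positions: probe a hash set of the (lowered, stripped) needles
--     # with the window t[j:j+L] for each distinct needle length L, then emit in order.
--     t = text.lower()
--     cleaned = [s.strip() for s in needles]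
--     targets = set()
--     for c in cleaned:
--         w = c.lower()
--         if w:
--             targets.add(w)
--     lengths = {len(w) for w in targets}
--     present = set()
--     for j in range(len(t)):
--         for L in lengths:
--             w = t[j:j+L]
--             if w in targets:
--                 present.add(w)
--     return [c for c in cleaned if c and c.lower() in present]
-- ===== Notes on version B (the rewrite author's own statement) =====
-- stated objective: faster
-- what changed: Instead of running one substring scan over the whole text per needle, B lowers/strips once, puts the distinct non-empty lowered needles in a hash set, makes a single pass over the text positions probing that set with the window t[j:j+L] for each distinct needle length L to collect a present-set, and finally emits the stripped needles in order by membership.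
import Mathlib
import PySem

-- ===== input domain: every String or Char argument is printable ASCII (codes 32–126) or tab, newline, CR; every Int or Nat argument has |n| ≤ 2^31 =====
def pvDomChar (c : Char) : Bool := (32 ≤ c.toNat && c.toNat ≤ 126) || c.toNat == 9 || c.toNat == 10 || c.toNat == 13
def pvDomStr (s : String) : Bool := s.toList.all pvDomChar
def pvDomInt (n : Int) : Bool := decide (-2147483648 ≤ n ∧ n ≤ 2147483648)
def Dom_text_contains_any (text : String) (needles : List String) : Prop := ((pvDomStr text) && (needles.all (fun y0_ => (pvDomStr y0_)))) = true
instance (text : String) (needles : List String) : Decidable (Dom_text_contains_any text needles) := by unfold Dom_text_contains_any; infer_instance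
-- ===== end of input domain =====

-- B replaces A's per-needle `in`-scan by one pass over the text positions, probing a hash set of
-- the prepared needles with the window t[j:j+L] per distinct length L, then emits in order
-- (measured faster on the generated timing inputs: duplicate/shared-length needles cost one probe, not one scan each).


-- ===== PORT A =====
def text_contains_any (text : String) (needles : List String) : List String :=
  let t := PySem.Str.lower text
  needles.foldl (fun hits s =>
    let s1 := if s.toList.isEmpty then "" else s          -- (s or "")
    let s2 := PySem.Str.strip s1
    if !s2.toList.isEmpty && PySem.Str.isIn (PySem.Str.lower s2) t
    then hits ++ [s2] else hits) []

-- ===== PORT B =====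
def text_contains_any_alt (text : String) (needles : List String) : List String :=
  let t := PySem.Str.lower text
  let cleaned := needles.map (fun s => PySem.Str.strip s)
  let targets : PySem.Set String := cleaned.foldl (fun ts c =>
      if !(PySem.Str.lower c).toList.isEmpty then PySem.Set.add ts (PySem.Str.lower c) else ts)
      PySem.Set.empty
  let lengths : PySem.Set Int := PySem.Set.ofList (targets.map (fun w => (PySem.Str.len w : Int)))
  let present : PySem.Set String :=
    (PySem.List.pyRange 0 (PySem.Str.len t : Int) 1).foldl
      (fun pr j => lengths.foldl (fun pr L =>
        -- w = t[j:j+L]; if w in targets: present.add(w)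
        if PySem.Set.contains targets (PySem.Str.slice t (some j) (some (j + L)))
        then PySem.Set.add pr (PySem.Str.slice t (some j) (some (j + L))) else pr) pr)
      PySem.Set.empty
  cleaned.filter (fun c => !c.toList.isEmpty && PySem.Set.contains present (PySem.Str.lower c))

-- ===== PRECONDITION & SPEC =====
def Spec_text_contains_any (text : String) (needles : List String) (out : List String) : Prop := out = text_contains_any_alt text needles
instance (text : String) (needles : List String) (out : List String) : Decidable (Spec_text_contains_any text needles out) := by unfold Spec_text_contains_any; infer_instance

-- ===== CLAIM (what is proved, stated in full; the proofs are below) =====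
def Claim_equal_text_contains_any : Prop := ∀ (text : String) (needles : List String), Dom_text_contains_any text needles → Spec_text_contains_any text needles (text_contains_any text needles)

-- ===== LEMMAS AND PROOFS =====

-- (s or "").strip() is s.strip() for strings
theorem strip_or_empty (s : String) :
    PySem.Str.strip (if s.toList.isEmpty then "" else s) = PySem.Str.strip s := by
  by_cases h : s.toList.isEmpty
  · have : s = "" := by cases s; simp_all
    simp [this]
  · simp [h]

-- lowering keeps (non)emptiness
theorem lower_not_empty (c : String) (h : ¬ c.toList.isEmpty = true) :
    ¬ (PySem.Str.lower c).toList.isEmpty = true := by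
  simp only [List.isEmpty_iff, String.toList_eq_nil_iff, PySem.Str.toList_lower, PySem.Chars.lower,
    List.isEmpty_map] at *
  exact h

-- membership after a conditional-add loop into a set
theorem mem_foldl_add_if {α β : Type} [BEq β] [LawfulBEq β] (l : List α) (P : α → Bool)
    (g : α → β) (s0 : PySem.Set β) (x : β) :
    x ∈ l.foldl (fun s a => if P a then PySem.Set.add s (g a) else s) s0 ↔
      x ∈ s0 ∨ ∃ a ∈ l, P a = true ∧ x = g a := by
  induction l generalizing s0 with
  | nil => simp
  | cons a as ih =>
      by_cases h : P a = true
      · simp only [List.foldl_cons, if_pos h, ih, PySem.Set.mem_add, List.mem_cons]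
        constructor
        · rintro (⟨hx | rfl⟩ | ⟨a', ha', hp, rfl⟩)
          · exact Or.inl hx
          · exact Or.inr ⟨a, Or.inl rfl, h, rfl⟩
          · exact Or.inr ⟨a', Or.inr ha', hp, rfl⟩
        · rintro (hx | ⟨a', (rfl | ha'), hp, rfl⟩)
          · exact Or.inl (Or.inl hx)
          · exact Or.inl (Or.inr rfl)
          · exact Or.inr ⟨a', ha', hp, rfl⟩
      · simp only [List.foldl_cons, if_neg h, ih, List.mem_cons]
        constructor
        · rintro (hx | ⟨a', ha', hp, rfl⟩)
          · exact Or.inl hx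
          · exact Or.inr ⟨a', Or.inr ha', hp, rfl⟩
        · rintro (hx | ⟨a', (rfl | ha'), hp, rfl⟩)
          · exact Or.inl hx
          · exact absurd hp h
          · exact Or.inr ⟨a', ha', hp, rfl⟩

-- membership after the nested position × length loop
theorem mem_foldl_foldl_add_if (js ls : List Int) (P : Int → Int → Bool)
    (g : Int → Int → String) (pr : PySem.Set String) (x : String) :
    x ∈ js.foldl (fun pr j => ls.foldl (fun pr L => if P j L then PySem.Set.add pr (g j L) else pr) pr) pr ↔
      x ∈ pr ∨ ∃ j ∈ js, ∃ L ∈ ls, P j L = true ∧ x = g j L := by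
  induction js generalizing pr with
  | nil => simp
  | cons j js ih =>
      simp only [List.foldl_cons, ih, mem_foldl_add_if, List.mem_cons]
      constructor
      · rintro ((hx | ⟨L, hL, hp, rfl⟩) | ⟨j', hj', L, hL, hp, rfl⟩)
        · exact Or.inl hx
        · exact Or.inr ⟨j, Or.inl rfl, L, hL, hp, rfl⟩
        · exact Or.inr ⟨j', Or.inr hj', L, hL, hp, rfl⟩
      · rintro (hx | ⟨j', (rfl | hj'), L, hL, hp, rfl⟩)
        · exact Or.inl (Or.inl hx)
        · exact Or.inl (Or.inr ⟨L, hL, hp, rfl⟩)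
        · exact Or.inr ⟨j', hj', L, hL, hp, rfl⟩

-- a nonempty pattern occurs in t iff it equals some window t[j:j+L] with its own length among ls
theorem isIn_iff_exists_window (t x : String) (ls : List Int) (hx : x.toList ≠ [])
    (hL : (x.toList.length : Int) ∈ ls) (hpos : ∀ L ∈ ls, 0 ≤ L) :
    PySem.Chars.isIn x.toList t.toList = true ↔
      ∃ j ∈ PySem.List.pyRange 0 (t.toList.length : Int) 1, ∃ L ∈ ls,
        x = PySem.Str.slice t (some j) (some (j + L)) := by
  rw [← PySem.Chars.exists_prefix_drop_iff_isIn]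
  constructor
  · rintro ⟨j, hj⟩
    have hlt : j < t.toList.length := by
      by_contra hle
      have : t.toList.drop j = [] := List.drop_eq_nil_of_le (by omega)
      rw [this] at hj
      exact hx (List.prefix_nil.mp hj)
    refine ⟨(j : Int), ?_, (x.toList.length : Int), hL, ?_⟩
    · rw [PySem.List.mem_pyRange_one]; constructor <;> [positivity; exact_mod_cast hlt]
    · apply String.toList_inj.mp
      simp only [PySem.Str.toList_slice, PySem.Chars.slice_eq_listSlice]
      rw [PySem.List.slice_toNat _ (by positivity) (by positivity)]
      have h1 : ((j : Int) + (x.toList.length : Int)).toNat - ((j : Int)).toNat = x.toList.length := by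
        omega
      rw [h1]
      have : ((j : Int)).toNat = j := by omega
      rw [this]
      exact List.prefix_iff_eq_take.mp hj
  · rintro ⟨j, hj, L, hLmem, hxeq⟩
    rw [PySem.List.mem_pyRange_one] at hj
    have hj0 : 0 ≤ j := hj.1
    have hL0 : 0 ≤ L := hpos L hLmem
    refine ⟨j.toNat, ?_⟩
    have : x.toList = (t.toList.drop j.toNat).take ((j + L).toNat - j.toNat) := by
      rw [hxeq]
      simp only [PySem.Str.toList_slice, PySem.Chars.slice_eq_listSlice]
      rw [PySem.List.slice_toNat _ hj0 (by omega)]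
    rw [this]
    exact List.take_prefix _ _

-- ===== VERDICT (by name: the statement is the Claim_ definition above) =====
theorem text_contains_any_spec : Claim_equal_text_contains_any := by
  intro text needles _
  unfold Spec_text_contains_any text_contains_any text_contains_any_alt
  simp only [strip_or_empty]
  rw [PySem.List.foldl_append_if
        (p := fun s => !(PySem.Str.strip s).toList.isEmpty &&
          PySem.Str.isIn (PySem.Str.lower (PySem.Str.strip s)) (PySem.Str.lower text))
        (f := fun s => PySem.Str.strip s)]
  rw [List.nil_append, List.filter_map]
  refine congrArg (List.map _) (List.filter_congr ?_)
  intro s hs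
  simp only [Function.comp]
  have hc : PySem.Str.strip s ∈ needles.map (fun s => PySem.Str.strip s) :=
    List.mem_map_of_mem hs
  set c := PySem.Str.strip s with hcdef
  by_cases hce : c.toList.isEmpty
  · simp [hce]
  · simp only [hce, Bool.not_false, Bool.true_and]
    -- abbreviations matching the B port
    set t := PySem.Str.lower text with htdef
    set cleaned := needles.map (fun s => PySem.Str.strip s) with hcl
    set targets : PySem.Set String := cleaned.foldl (fun ts c =>
        if !(PySem.Str.lower c).toList.isEmpty then PySem.Set.add ts (PySem.Str.lower c) else ts)
        PySem.Set.empty with htg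
    have hmt : PySem.Str.lower c ∈ targets := by
      rw [htg, mem_foldl_add_if]
      exact Or.inr ⟨c, hc, by simpa using lower_not_empty c hce, rfl⟩
    have hwne : (PySem.Str.lower c).toList ≠ [] := by
      intro h
      exact lower_not_empty c hce (by simp [h])
    have hlen : (PySem.Str.len t : Int) = (t.toList.length : Int) := by
      simp [PySem.Str.len_eq]
    rw [Bool.eq_iff_iff, PySem.Set.contains_iff,
        mem_foldl_foldl_add_if _ _
          (fun j L => PySem.Set.contains targets (PySem.Str.slice t (some j) (some (j + L))))
          (fun j L => PySem.Str.slice t (some j) (some (j + L)))]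
    have hLmem : ((PySem.Str.lower c).toList.length : Int) ∈
        PySem.Set.ofList (targets.map (fun w => (PySem.Str.len w : Int))) := by
      rw [PySem.Set.mem_ofList]
      exact List.mem_map.mpr ⟨PySem.Str.lower c, hmt, by simp [PySem.Str.len_eq]⟩
    have hpos : ∀ L ∈ PySem.Set.ofList (targets.map (fun w => (PySem.Str.len w : Int))), 0 ≤ L := by
      intro L hL
      rw [PySem.Set.mem_ofList] at hL
      obtain ⟨w, _, rfl⟩ := List.mem_map.mp hL
      simp [PySem.Str.len_eq]
    simp only [PySem.Str.isIn_eq]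
    rw [hlen, isIn_iff_exists_window t (PySem.Str.lower c) _ hwne hLmem hpos]
    constructor
    · rintro ⟨j, hj, L, hL, hxeq⟩
      refine Or.inr ⟨j, hj, L, hL, ?_, hxeq⟩
      rw [← hxeq]
      exact (PySem.Set.contains_iff _ _).mpr hmt
    · rintro (h | ⟨j, hj, L, hL, _, hxeq⟩)
      · exact absurd h (by simp [PySem.Set.empty])
      · exact ⟨j, hj, L, hL, hxeq⟩
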